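-- pv_equiv track=rewrite | github.com/Idorobots/org-cli | src/org/cli_common.py | parse_filter_order_from_argv
-- ===== SOURCE A (Python) =====
-- FILTER_OPTIONS_WITH_VALUE = {
--     "--filter-priority",
--     "--filter-level",
--     "--filter-repeats-above",
--     "--filter-repeats-below",
--     "--filter-date-from",
--     "--filter-date-until",
--     "--filter-property",
--     "--filter-tag",
--     "--filter-heading",
--     "--filter-body",
-- }
--
-- FILTER_OPTIONS_FLAGS = {
--     "--filter-completed",
--     "--filter-not-completed",
-- }
--
-- def parse_filter_order_from_argv(argv: list[str]) -> list[str]: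
--     """Parse filter option order from command-line arguments."""
--     filter_order: list[str] = []
--     for token in argv:
--         if token in FILTER_OPTIONS_WITH_VALUE or token in FILTER_OPTIONS_FLAGS:
--             filter_order.append(token)
--             continue
--         for option_name in FILTER_OPTIONS_WITH_VALUE:
--             if token.startswith(f"{option_name}="):
--                 filter_order.append(option_name)
--                 break
--     return filter_order
-- ===== SOURCE B (Python) =====
-- FILTER_OPTIONS_WITH_VALUE = {
--     "--filter-priority",
--     "--filter-level",
--     "--filter-repeats-above",
--     "--filter-repeats-below",
--     "--filter-date-from",
--     "--filter-date-until",
--     "--filter-property",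
--     "--filter-tag",
--     "--filter-heading",
--     "--filter-body",
-- }
--
-- FILTER_OPTIONS_FLAGS = {
--     "--filter-completed",
--     "--filter-not-completed",
-- }
--
-- def parse_filter_order_from_argv(argv: list[str]) -> list[str]:
--     """Parse filter option order from command-line arguments."""
--     # Gather-then-sort: for each known option, collect the argv positions it
--     # occurs at, then order all hits by position.  Correct because each token
--     # matches at most one option (option names contain no '=', so an exact
--     # match and a '<name>=value' match can never fire for the same token, and
--     # the part before the first '=' determines the value option uniquely).
--     hits = []
--     for name in sorted(FILTER_OPTIONS_FLAGS):
--         for position, token in enumerate(argv):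
--             if token == name:
--                 hits.append((position, name))
--     for name in sorted(FILTER_OPTIONS_WITH_VALUE):
--         for position, token in enumerate(argv):
--             if token == name or token.startswith(name + "="):
--                 hits.append((position, name))
--     hits.sort(key=lambda hit: hit[0])
--     return [name for _, name in hits]
-- ===== Notes on version B (the rewrite author's own statement) =====
-- stated objective: alternative
-- what changed: B inverts the traversal: instead of scanning argv once and testing each token against the option sets with an inner startswith loop, it loops over the constant option names, collects (position, name) hits per option from argv, then sorts the hits by position and emits the names; correct because each token matches at most one option.
import Mathlib
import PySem

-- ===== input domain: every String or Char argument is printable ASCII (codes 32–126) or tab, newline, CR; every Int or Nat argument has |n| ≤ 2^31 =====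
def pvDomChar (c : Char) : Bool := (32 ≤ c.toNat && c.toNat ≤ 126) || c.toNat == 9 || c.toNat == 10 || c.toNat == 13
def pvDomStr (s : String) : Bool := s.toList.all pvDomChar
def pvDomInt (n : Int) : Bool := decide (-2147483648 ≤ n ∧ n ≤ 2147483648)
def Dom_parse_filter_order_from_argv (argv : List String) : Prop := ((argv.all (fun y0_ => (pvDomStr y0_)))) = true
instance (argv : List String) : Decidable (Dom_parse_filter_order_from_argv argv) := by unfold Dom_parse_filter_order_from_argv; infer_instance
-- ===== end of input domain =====

-- B inverts the traversal: it loops over the constant option names gathering (position, name)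
-- hits from argv and sorts the hits by position, instead of A's one argv scan with an inner
-- startswith loop (objective: alternative).

-- ===== PORT A =====
-- the module-level sets, as PySem sets in source order
def FILTER_OPTIONS_WITH_VALUE : PySem.Set String := PySem.Set.ofList
  ["--filter-priority", "--filter-level", "--filter-repeats-above", "--filter-repeats-below",
   "--filter-date-from", "--filter-date-until", "--filter-property", "--filter-tag",
   "--filter-heading", "--filter-body"]

def FILTER_OPTIONS_FLAGS : PySem.Set String := PySem.Set.ofList
  ["--filter-completed", "--filter-not-completed"]

-- the inner 'for option_name in FILTER_OPTIONS_WITH_VALUE: if token.startswith(...): append; break'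
def pvInnerScan (names : List String) (token : String) : List String :=
  match names with
  | [] => []
  | n :: rest =>
    if PySem.Str.startswith token (n ++ "=") then [n] else pvInnerScan rest token

def parse_filter_order_from_argv (argv : List String) : List String :=
  argv.foldl (fun filter_order token =>
    if FILTER_OPTIONS_WITH_VALUE.contains token || FILTER_OPTIONS_FLAGS.contains token then
      filter_order ++ [token]
    else
      filter_order ++ pvInnerScan FILTER_OPTIONS_WITH_VALUE token) []

-- ===== PORT B =====
-- sorted(FILTER_OPTIONS_FLAGS), sorted(FILTER_OPTIONS_WITH_VALUE)
def pvFlagsSorted : List String := PySem.List.sorted FILTER_OPTIONS_FLAGS (fun x => x)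
def pvValuesSorted : List String := PySem.List.sorted FILTER_OPTIONS_WITH_VALUE (fun x => x)

def parse_filter_order_from_argv_alt (argv : List String) : List String :=
  -- hits = []; the two gather loops; hits.sort(key=lambda hit: hit[0]); [name for _, name in hits]
  let hits1 := pvFlagsSorted.foldl (fun hits name =>
    (PySem.List.enumerate argv).foldl (fun hits p =>
      if p.2 == name then hits ++ [(p.1, name)] else hits) hits) []
  let hits2 := pvValuesSorted.foldl (fun hits name =>
    (PySem.List.enumerate argv).foldl (fun hits p =>
      if p.2 == name || PySem.Str.startswith p.2 (name ++ "=") then hits ++ [(p.1, name)] else hits) hits) hits1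
  (PySem.List.sorted hits2 (fun hit => hit.1)).map (fun hit => hit.2)

-- ===== PRECONDITION & SPEC =====
def Spec_parse_filter_order_from_argv (argv : List String) (out : List String) : Prop := out = parse_filter_order_from_argv_alt argv
instance (argv : List String) (out : List String) : Decidable (Spec_parse_filter_order_from_argv argv out) := by unfold Spec_parse_filter_order_from_argv; infer_instance

-- ===== CLAIM (what is proved, stated in full; the proofs are below) =====
def Claim_equal_parse_filter_order_from_argv : Prop := ∀ (argv : List String), Dom_parse_filter_order_from_argv argv → Spec_parse_filter_order_from_argv argv (parse_filter_order_from_argv argv)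

-- ===== LEMMAS AND PROOFS =====

-- the unique option (if any) a token contributes, read off A's code
def pvClassify (token : String) : Option String :=
  if FILTER_OPTIONS_WITH_VALUE.contains token || FILTER_OPTIONS_FLAGS.contains token then some token
  else (pvInnerScan FILTER_OPTIONS_WITH_VALUE token).head?

-- the option names with their with-value flag, in B's gather order
def pvOpts : List (String × Bool) :=
  pvFlagsSorted.map (fun n => (n, false)) ++ pvValuesSorted.map (fun n => (n, true))

-- B's per-option hit condition
def pvCond (o : String × Bool) (token : String) : Bool :=
  token == o.1 || (o.2 && PySem.Str.startswith token (o.1 ++ "="))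

def pvG (o : String × Bool) (p : Int × String) : Option (Int × String) :=
  if pvCond o p.2 then some (p.1, o.1) else none

def pvNoEq (c : Char) : Bool := c != '='

-- ---- string facts about startswith(name + "=") ----

theorem pv_takeWhile_append (ns t : List Char) (h : '=' ∉ ns) :
    List.takeWhile pvNoEq (ns ++ '=' :: t) = ns := by
  induction ns with
  | nil => simp [pvNoEq]
  | cons a ns ih =>
    have ha : a ≠ '=' := fun e => h (e ▸ List.mem_cons_self)
    have h' : '=' ∉ ns := fun e => h (List.mem_cons_of_mem _ e)
    simp [pvNoEq, ha, ih h']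

theorem pv_prefix_iff (ns cs : List Char) (h : '=' ∉ ns) :
    (ns ++ ['=']) <+: cs ↔ ('=' ∈ cs ∧ cs.takeWhile pvNoEq = ns) := by
  constructor
  · rintro ⟨t, rfl⟩
    refine ⟨by simp, ?_⟩
    rw [List.append_assoc]
    exact pv_takeWhile_append ns t h
  · rintro ⟨hm, ht⟩
    have hd : cs.dropWhile pvNoEq ≠ [] := by
      intro he
      have := List.dropWhile_eq_nil_iff.mp he '=' hm
      simp [pvNoEq] at this
    obtain ⟨d, ds, hds⟩ := List.exists_cons_of_ne_nil hd
    have hdeq : d = '=' := by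
      have h2 := List.head_dropWhile_not pvNoEq hd
      have h3 : (List.dropWhile pvNoEq cs).head hd = d := by simp [hds]
      rw [h3] at h2
      simpa [pvNoEq] using h2
    refine ⟨ds, ?_⟩
    calc ns ++ ['='] ++ ds = ns ++ ('=' :: ds) := by simp
      _ = cs.takeWhile pvNoEq ++ cs.dropWhile pvNoEq := by rw [ht, hds, hdeq]
      _ = cs := List.takeWhile_append_dropWhile

theorem pv_startswith_iff (token n : String) :
    PySem.Str.startswith token (n ++ "=") = true ↔ (n.toList ++ ['=']) <+: token.toList := by
  simp [PySem.Chars.startswith_iff]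

theorem pv_innerScan_eq (names : List String) (token : String)
    (h : ∀ n ∈ names, '=' ∉ n.toList) :
    pvInnerScan names token =
      (if '=' ∈ token.toList ∧ String.ofList (token.toList.takeWhile pvNoEq) ∈ names then
        [String.ofList (token.toList.takeWhile pvNoEq)] else []) := by
  induction names with
  | nil => simp [pvInnerScan]
  | cons n rest ih =>
    have hn : '=' ∉ n.toList := h n List.mem_cons_self
    have hrest : ∀ m ∈ rest, '=' ∉ m.toList := fun m hm => h m (List.mem_cons_of_mem _ hm)
    show (if PySem.Str.startswith token (n ++ "=") = true then [n] else pvInnerScan rest token) = _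
    by_cases hs : PySem.Str.startswith token (n ++ "=") = true
    · obtain ⟨hm, ht⟩ := (pv_prefix_iff n.toList token.toList hn).1 ((pv_startswith_iff token n).1 hs)
      have hname : String.ofList (token.toList.takeWhile pvNoEq) = n := by
        rw [ht]; simp
      rw [if_pos hs, hname, if_pos ⟨hm, List.mem_cons_self⟩]
    · rw [if_neg hs, ih hrest]
      by_cases hm : '=' ∈ token.toList
      · have hne : String.ofList (token.toList.takeWhile pvNoEq) ≠ n := by
          intro he
          apply hs
          apply (pv_startswith_iff token n).2
          apply (pv_prefix_iff n.toList token.toList hn).2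
          refine ⟨hm, ?_⟩
          have := congrArg String.toList he
          simpa using this
        have hcond : ('=' ∈ token.toList ∧ String.ofList (token.toList.takeWhile pvNoEq) ∈ rest) ↔
            ('=' ∈ token.toList ∧ String.ofList (token.toList.takeWhile pvNoEq) ∈ n :: rest) := by
          simp [List.mem_cons, hne]
        rw [if_congr hcond rfl rfl]
      · rw [if_neg (fun hc => hm hc.1), if_neg (fun hc => hm hc.1)]

-- no option name contains '='
theorem pv_values_no_eq : ∀ n ∈ (FILTER_OPTIONS_WITH_VALUE : List String), '=' ∉ n.toList := by decide
theorem pv_flags_no_eq : ∀ n ∈ (FILTER_OPTIONS_FLAGS : List String), '=' ∉ n.toList := by decide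
theorem pv_flags_not_values : ∀ n ∈ (FILTER_OPTIONS_FLAGS : List String), n ∉ (FILTER_OPTIONS_WITH_VALUE : List String) := by decide

-- a token that is a member of either set contains no '='
theorem pv_contains_no_eq (t : String) (hm : '=' ∈ t.toList)
    (hc : (FILTER_OPTIONS_WITH_VALUE.contains t || FILTER_OPTIONS_FLAGS.contains t) = true) : False := by
  rcases Bool.or_eq_true_iff.mp hc with h | h
  · exact pv_values_no_eq t ((PySem.Set.contains_iff _ _).mp h) hm
  · exact pv_flags_no_eq t ((PySem.Set.contains_iff _ _).mp h) hm

-- ---- characterization: B's hit condition fires exactly when A classifies the token as o's name ----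

theorem pv_char_flag (name t : String) (hf : name ∈ (FILTER_OPTIONS_FLAGS : List String)) :
    (t == name) = (pvClassify t == some name) := by
  by_cases ht : t = name
  · subst ht
    have hc : (FILTER_OPTIONS_WITH_VALUE.contains t || FILTER_OPTIONS_FLAGS.contains t) = true :=
      Bool.or_eq_true_iff.mpr (Or.inr ((PySem.Set.contains_iff _ _).mpr hf))
    unfold pvClassify
    rw [if_pos hc]
    simp
  · have hlhs : (t == name) = false := by simpa using ht
    rw [hlhs]
    unfold pvClassify
    by_cases hc : (FILTER_OPTIONS_WITH_VALUE.contains t || FILTER_OPTIONS_FLAGS.contains t) = true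
    · rw [if_pos hc]
      simp [ht]
    · rw [if_neg hc, pv_innerScan_eq _ _ pv_values_no_eq]
      by_cases hcond : '=' ∈ t.toList ∧
          String.ofList (t.toList.takeWhile pvNoEq) ∈ (FILTER_OPTIONS_WITH_VALUE : List String)
      · rw [if_pos hcond]
        have : String.ofList (t.toList.takeWhile pvNoEq) ≠ name :=
          fun he => pv_flags_not_values name hf (he ▸ hcond.2)
        simpa using this
      · rw [if_neg hcond]; rfl

theorem pv_char_value (name t : String) (hv : name ∈ (FILTER_OPTIONS_WITH_VALUE : List String)) :
    (t == name || PySem.Str.startswith t (name ++ "=")) = (pvClassify t == some name) := by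
  have hnne : '=' ∉ name.toList := pv_values_no_eq name hv
  by_cases ht : t = name
  · subst ht
    have hc : (FILTER_OPTIONS_WITH_VALUE.contains t || FILTER_OPTIONS_FLAGS.contains t) = true :=
      Bool.or_eq_true_iff.mpr (Or.inl ((PySem.Set.contains_iff _ _).mpr hv))
    unfold pvClassify
    rw [if_pos hc]
    simp
  · have hteq : (t == name) = false := by simpa using ht
    by_cases hs : PySem.Str.startswith t (name ++ "=") = true
    · obtain ⟨hm, htw⟩ := (pv_prefix_iff name.toList t.toList hnne).1 ((pv_startswith_iff t name).1 hs)
      have hc : ¬ (FILTER_OPTIONS_WITH_VALUE.contains t || FILTER_OPTIONS_FLAGS.contains t) = true :=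
        fun hc => pv_contains_no_eq t hm hc
      have hname : String.ofList (t.toList.takeWhile pvNoEq) = name := by rw [htw]; simp
      rw [hteq, hs]
      unfold pvClassify
      rw [if_neg hc, pv_innerScan_eq _ _ pv_values_no_eq, if_pos ⟨hm, hname ▸ hv⟩, hname]
      simp
    · have hsf : PySem.Str.startswith t (name ++ "=") = false := by
        simpa using hs
      rw [hteq, hsf]
      unfold pvClassify
      by_cases hc : (FILTER_OPTIONS_WITH_VALUE.contains t || FILTER_OPTIONS_FLAGS.contains t) = true
      · rw [if_pos hc]
        simp [ht]
      · rw [if_neg hc, pv_innerScan_eq _ _ pv_values_no_eq]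
        by_cases hcond : '=' ∈ t.toList ∧
            String.ofList (t.toList.takeWhile pvNoEq) ∈ (FILTER_OPTIONS_WITH_VALUE : List String)
        · rw [if_pos hcond]
          have hne : String.ofList (t.toList.takeWhile pvNoEq) ≠ name := by
            intro he
            apply hs
            apply (pv_startswith_iff t name).2
            apply (pv_prefix_iff name.toList t.toList hnne).2
            refine ⟨hcond.1, ?_⟩
            have := congrArg String.toList he
            simpa using this
          simpa using hne
        · rw [if_neg hcond]; rfl

-- membership in pvOpts means: a flag name (with false) or a value name (with true)
theorem pv_mem_opts (o : String × Bool) (ho : o ∈ pvOpts) :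
    (o.2 = false ∧ o.1 ∈ (FILTER_OPTIONS_FLAGS : List String)) ∨
    (o.2 = true ∧ o.1 ∈ (FILTER_OPTIONS_WITH_VALUE : List String)) := by
  rcases List.mem_append.mp ho with h | h
  · obtain ⟨n, hn, rfl⟩ := List.mem_map.mp h
    exact Or.inl ⟨rfl, (PySem.List.mem_sorted _ _ _ _).mp hn⟩
  · obtain ⟨n, hn, rfl⟩ := List.mem_map.mp h
    exact Or.inr ⟨rfl, (PySem.List.mem_sorted _ _ _ _).mp hn⟩

theorem pv_cond_char (o : String × Bool) (ho : o ∈ pvOpts) (t : String) :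
    pvCond o t = (pvClassify t == some o.1) := by
  rcases pv_mem_opts o ho with ⟨h2, hmem⟩ | ⟨h2, hmem⟩
  · unfold pvCond; rw [h2]
    simpa using pv_char_flag o.1 t hmem
  · unfold pvCond; rw [h2]
    simpa using pv_char_value o.1 t hmem

-- if A classifies a token as n, then n is one of the option names
theorem pv_classify_mem (t n : String) (h : pvClassify t = some n) :
    n ∈ pvOpts.map Prod.fst := by
  have hmap : pvOpts.map Prod.fst = pvFlagsSorted ++ pvValuesSorted := by
    unfold pvOpts; simp [Function.comp_def]
  rw [hmap, List.mem_append]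
  unfold pvFlagsSorted pvValuesSorted
  rw [PySem.List.mem_sorted, PySem.List.mem_sorted]
  unfold pvClassify at h
  by_cases hc : (FILTER_OPTIONS_WITH_VALUE.contains t || FILTER_OPTIONS_FLAGS.contains t) = true
  · rw [if_pos hc] at h
    cases h
    rcases Bool.or_eq_true_iff.mp hc with h | h
    · exact Or.inr ((PySem.Set.contains_iff _ _).mp h)
    · exact Or.inl ((PySem.Set.contains_iff _ _).mp h)
  · rw [if_neg hc, pv_innerScan_eq _ _ pv_values_no_eq] at h
    by_cases hcond : '=' ∈ t.toList ∧
        String.ofList (t.toList.takeWhile pvNoEq) ∈ (FILTER_OPTIONS_WITH_VALUE : List String)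
    · rw [if_pos hcond] at h
      simp at h
      exact Or.inr (h ▸ hcond.2)
    · rw [if_neg hcond] at h
      simp at h

theorem pv_opts_names_nodup : (pvOpts.map Prod.fst).Nodup := by
  have hmap : pvOpts.map Prod.fst = pvFlagsSorted ++ pvValuesSorted := by
    unfold pvOpts; simp [Function.comp_def]
  rw [hmap]
  apply List.Nodup.append
  · exact (PySem.List.sorted_perm FILTER_OPTIONS_FLAGS (fun x => x) false).symm.nodup (by decide)
  · exact (PySem.List.sorted_perm FILTER_OPTIONS_WITH_VALUE (fun x => x) false).symm.nodup (by decide)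
  · intro n hn hn'
    have h1 : n ∈ (FILTER_OPTIONS_FLAGS : List String) := by
      have := hn; unfold pvFlagsSorted at this
      exact (PySem.List.mem_sorted _ _ _ _).mp this
    have h2 : n ∈ (FILTER_OPTIONS_WITH_VALUE : List String) := by
      have := hn'; unfold pvValuesSorted at this
      exact (PySem.List.mem_sorted _ _ _ _).mp this
    exact pv_flags_not_values n h1 h2

-- ---- A equals the flatMap of pvClassify ----

theorem pv_innerScan_head? (names : List String) (token : String) :
    (pvInnerScan names token).head?.toList = pvInnerScan names token := by
  induction names with
  | nil => simp [pvInnerScan]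
  | cons n rest ih =>
    rw [pvInnerScan]
    split
    · rfl
    · exact ih

theorem pv_A_eq_flatMap (argv : List String) :
    parse_filter_order_from_argv argv = argv.flatMap (fun t => (pvClassify t).toList) := by
  unfold parse_filter_order_from_argv
  rw [PySem.List.foldl_congr_mem argv _ (fun acc t => acc ++ (pvClassify t).toList) []
    (by
      intro acc t _
      show (if (FILTER_OPTIONS_WITH_VALUE.contains t || FILTER_OPTIONS_FLAGS.contains t) = true then
          acc ++ [t] else acc ++ pvInnerScan FILTER_OPTIONS_WITH_VALUE t)
        = acc ++ (pvClassify t).toList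
      unfold pvClassify
      by_cases hc : (FILTER_OPTIONS_WITH_VALUE.contains t || FILTER_OPTIONS_FLAGS.contains t) = true
      · rw [if_pos hc, if_pos hc]; rfl
      · rw [if_neg hc, if_neg hc, pv_innerScan_head?])]
  simpa using PySem.List.foldl_append_eq_flatMap (fun t => (pvClassify t).toList) argv []

-- ---- the common target: classify over enumerated argv ----

def pvTarget (argv : List String) : List (Int × String) :=
  (PySem.List.enumerate argv).filterMap (fun p => (pvClassify p.2).map (fun n => (p.1, n)))

theorem pv_target_map_snd (argv : List String) : ∀ s : Int,
    (((PySem.List.enumerate argv s).filterMap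
        (fun p => (pvClassify p.2).map (fun n => (p.1, n)))).map (fun q => q.2))
      = argv.flatMap (fun t => (pvClassify t).toList) := by
  induction argv with
  | nil => intro s; simp [PySem.List.enumerate_nil]
  | cons x xs ih =>
    intro s
    rw [PySem.List.enumerate_cons]
    cases h : pvClassify x <;> simp [h, ih (s + 1)]

theorem pv_target_pairwise (argv : List String) :
    (pvTarget argv).Pairwise (fun a b => a.1 < b.1) := by
  unfold pvTarget
  rw [List.pairwise_filterMap]
  apply (PySem.List.pairwise_lt_enumerate argv 0).imp
  intro a b hab q hq q' hq'
  cases hca : pvClassify a.2 <;> rw [hca] at hq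
  · simp at hq
  cases hcb : pvClassify b.2 <;> rw [hcb] at hq'
  · simp at hq'
  simp at hq hq'
  rw [← hq, ← hq']
  exact hab

-- ---- B's gathered hits are a permutation of the target ----

theorem pv_filter_map_eq_filterMap {α β : Type} (p : α → Bool) (f : α → β) (l : List α) :
    (l.filter p).map f = l.filterMap (fun x => if p x then some (f x) else none) := by
  induction l with
  | nil => rfl
  | cons x l ih =>
    by_cases h : p x <;> simp [h, ih]

theorem pv_flatMap_append_perm {ω β : Type} (os : List ω) (A B : ω → List β) :
    (os.flatMap (fun o => A o ++ B o)).Perm (os.flatMap A ++ os.flatMap B) := by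
  induction os with
  | nil => simp
  | cons o os ih =>
    simp only [List.flatMap_cons]
    refine ((ih.append_left (A o ++ B o))).trans ?_
    rw [List.append_assoc (A o) (B o), List.append_assoc (A o) (os.flatMap A)]
    exact (List.perm_append_comm_assoc (B o) (os.flatMap A) (os.flatMap B)).append_left (A o)

theorem pv_flatMap_filterMap_perm {ω α β : Type} (os : List ω) (g : ω → α → Option β)
    (F : α → Option β) (h : ∀ x, os.filterMap (fun o => g o x) = (F x).toList) (E : List α) :
    (os.flatMap (fun o => E.filterMap (g o))).Perm (E.filterMap F) := by
  induction E with
  | nil => simp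
  | cons x E ih =>
    have hsplit : (fun o => List.filterMap (g o) (x :: E)) =
        (fun o => (g o x).toList ++ List.filterMap (g o) E) := by
      funext o
      cases hgo : g o x <;> simp [hgo]
    rw [hsplit]
    refine (pv_flatMap_append_perm os _ _).trans ?_
    rw [← List.filterMap_eq_flatMap_toList, h x]
    have hcons : List.filterMap F (x :: E) = (F x).toList ++ E.filterMap F := by
      cases hfx : F x <;> simp [hfx]
    rw [hcons]
    exact ih.append_left ((F x).toList)

-- filterMap that can fire on exactly one (present) name yields a singleton
theorem pv_filterMap_single {ω β : Type} (os : List ω) (k : ω → String) (n0 : String) (v : β)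
    (f : ω → Option β) (hf : ∀ o ∈ os, f o = if k o = n0 then some v else none)
    (hnd : (os.map k).Nodup) (hmem : n0 ∈ os.map k) : os.filterMap f = [v] := by
  induction os with
  | nil => simp at hmem
  | cons o os ih =>
    rw [List.map_cons] at hnd hmem
    rw [List.nodup_cons] at hnd
    rcases List.mem_cons.mp hmem with h0 | h0
    · have hfo : f o = some v := by rw [hf o List.mem_cons_self, if_pos h0.symm]
      have hrest : os.filterMap f = [] := by
        apply List.filterMap_eq_nil_iff.mpr
        intro o' ho'
        rw [hf o' (List.mem_cons_of_mem _ ho'), if_neg]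
        intro he
        have hmm := List.mem_map_of_mem (f := k) ho'
        rw [he.trans h0] at hmm
        exact hnd.1 hmm
      simp [hfo, hrest]
    · have hko : k o ≠ n0 := by
        intro he
        apply hnd.1
        rw [he]
        exact h0
      have hfo : f o = none := by rw [hf o List.mem_cons_self, if_neg hko]
      rw [List.filterMap_cons, hfo]
      exact ih (fun o' ho' => hf o' (List.mem_cons_of_mem _ ho')) hnd.2 h0

theorem pv_pointwise (p : Int × String) :
    pvOpts.filterMap (fun o => pvG o p) = ((pvClassify p.2).map (fun n => (p.1, n))).toList := by
  cases hc : pvClassify p.2 with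
  | none =>
    apply List.filterMap_eq_nil_iff.mpr
    intro o ho
    unfold pvG
    rw [pv_cond_char o ho, hc]
    rfl
  | some n0 =>
    apply pv_filterMap_single pvOpts Prod.fst n0 (p.1, n0)
    · intro o ho
      unfold pvG
      rw [pv_cond_char o ho, hc]
      by_cases he : o.1 = n0
      · rw [if_pos he, he]
        simp
      · rw [if_neg he]
        have hb : (some n0 == some o.1) = false := by
          simp
          exact fun hx => he hx.symm
        rw [hb]
        rfl
    · exact pv_opts_names_nodup
    · exact pv_classify_mem p.2 n0 hc

theorem pv_B_hits (argv : List String) :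
    (pvValuesSorted.foldl (fun hits name =>
        (PySem.List.enumerate argv).foldl (fun hits p =>
          if p.2 == name || PySem.Str.startswith p.2 (name ++ "=") then hits ++ [(p.1, name)] else hits) hits)
      (pvFlagsSorted.foldl (fun hits name =>
        (PySem.List.enumerate argv).foldl (fun hits p =>
          if p.2 == name then hits ++ [(p.1, name)] else hits) hits) []))
    = pvOpts.flatMap (fun o => (PySem.List.enumerate argv).filterMap (pvG o)) := by
  have hflag : ∀ name, ∀ hits : List (Int × String),
      (PySem.List.enumerate argv).foldl (fun hits p =>
        if p.2 == name then hits ++ [(p.1, name)] else hits) hits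
      = hits ++ (PySem.List.enumerate argv).filterMap (pvG (name, false)) := by
    intro name hits
    rw [PySem.List.foldl_append_if (fun p : Int × String => p.2 == name) (fun p : Int × String => (p.1, name))]
    rw [pv_filter_map_eq_filterMap]
    congr 1
    apply List.filterMap_congr
    intro p _
    unfold pvG pvCond
    simp
  have hval : ∀ name, ∀ hits : List (Int × String),
      (PySem.List.enumerate argv).foldl (fun hits p =>
        if p.2 == name || PySem.Str.startswith p.2 (name ++ "=") then hits ++ [(p.1, name)] else hits) hits
      = hits ++ (PySem.List.enumerate argv).filterMap (pvG (name, true)) := by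
    intro name hits
    rw [PySem.List.foldl_append_if (fun p : Int × String => p.2 == name || PySem.Str.startswith p.2 (name ++ "="))
      (fun p : Int × String => (p.1, name))]
    rw [pv_filter_map_eq_filterMap]
    rfl
  rw [PySem.List.foldl_congr_mem pvFlagsSorted _
        (fun hits name => hits ++ (PySem.List.enumerate argv).filterMap (pvG (name, false))) []
        (fun acc name _ => hflag name acc),
      PySem.List.foldl_append_eq_flatMap]
  rw [PySem.List.foldl_congr_mem pvValuesSorted _
        (fun hits name => hits ++ (PySem.List.enumerate argv).filterMap (pvG (name, true))) _
        (fun acc name _ => hval name acc),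
      PySem.List.foldl_append_eq_flatMap]
  unfold pvOpts
  rw [List.flatMap_append, List.flatMap_map, List.flatMap_map]
  simp

-- ===== VERDICT (by name: the statement is the Claim_ definition above) =====
theorem parse_filter_order_from_argv_spec : Claim_equal_parse_filter_order_from_argv := by
  intro argv _
  unfold Spec_parse_filter_order_from_argv
  have hperm : (pvTarget argv).Perm
      (pvOpts.flatMap (fun o => (PySem.List.enumerate argv).filterMap (pvG o))) :=
    (pv_flatMap_filterMap_perm pvOpts pvG
      (fun p => (pvClassify p.2).map (fun n => (p.1, n)))
      (fun x => pv_pointwise x) (PySem.List.enumerate argv)).symm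
  have halt : parse_filter_order_from_argv_alt argv
      = ((PySem.List.sorted (pvOpts.flatMap (fun o =>
          (PySem.List.enumerate argv).filterMap (pvG o))) (fun hit => hit.1)).map (fun hit => hit.2)) := by
    show ((PySem.List.sorted (pvValuesSorted.foldl (fun hits name =>
        (PySem.List.enumerate argv).foldl (fun hits p =>
          if p.2 == name || PySem.Str.startswith p.2 (name ++ "=") then hits ++ [(p.1, name)] else hits) hits)
      (pvFlagsSorted.foldl (fun hits name =>
        (PySem.List.enumerate argv).foldl (fun hits p =>
          if p.2 == name then hits ++ [(p.1, name)] else hits) hits) [])) (fun hit => hit.1)).map (fun hit => hit.2)) = _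
    rw [pv_B_hits argv]
  rw [halt, PySem.List.sorted_eq_of_perm_of_pairwise_lt _ (pvTarget argv) (fun hit => hit.1)
    hperm (pv_target_pairwise argv)]
  rw [pv_A_eq_flatMap argv]
  unfold pvTarget
  exact (pv_target_map_snd argv 0).symm
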